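-- pv_equiv track=rewrite | github.com/ParvMehta834/COMP2152_Project | lore_shard.py | _advanced_cipher
-- ===== SOURCE A (Python) =====
-- def _advanced_cipher(text):
--     """Better encryption using multiple techniques"""
--     # Reverse the words
--     words = text.split()
--     reversed_words = [word[::-1] for word in words]
--
--     # Apply Caesar cipher with alternating shifts
--     result = []
--     shift_direction = 1
--     for word in reversed_words:
--         encrypted_word = []
--         for char in word:
--             if char.isalpha():
--                 base = ord('A') if char.isupper() else ord('a')
--                 shift = 5 * shift_direction
--                 new_char = chr((ord(char) - base + shift) % 26 + base)
--                 encrypted_word.append(new_char)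
--                 shift_direction *= -1  # Alternate shift direction
--             else:
--                 encrypted_word.append(char)
--         result.append(''.join(encrypted_word))
--
--     return ' '.join(result)
-- ===== SOURCE B (Python) =====
-- def _advanced_cipher(text):
--     """Better encryption using multiple techniques"""
--     # Reversing every word of the normalized text = reversing the whole text
--     # and then reading the words in reverse order (whitespace collapses anyway).
--     carrier = ' '.join(reversed(text[::-1].split()))
--     # Collect the positions of alphabetic characters once; the shift of the
--     # k-th alphabetic character is +5 for even k, -5 for odd k.
--     chars = list(carrier)
--     alpha_positions = [i for i, ch in enumerate(chars) if ch.isalpha()]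
--     for k, i in enumerate(alpha_positions):
--         base = ord('A') if chars[i].isupper() else ord('a')
--         chars[i] = chr((ord(chars[i]) - base + (5, -5)[k % 2]) % 26 + base)
--     return ''.join(chars)
-- ===== Notes on version B (the rewrite author's own statement) =====
-- stated objective: alternative
-- what changed: B never reverses an individual word and keeps no running toggle: it builds the carrier by reversing the whole text and space-joining its words read back in reverse order, then collects the list of alphabetic positions once with enumerate and patches the character list in place, the shift sign taken from the rank parity of each position in that precomputed list.
import Mathlib
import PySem

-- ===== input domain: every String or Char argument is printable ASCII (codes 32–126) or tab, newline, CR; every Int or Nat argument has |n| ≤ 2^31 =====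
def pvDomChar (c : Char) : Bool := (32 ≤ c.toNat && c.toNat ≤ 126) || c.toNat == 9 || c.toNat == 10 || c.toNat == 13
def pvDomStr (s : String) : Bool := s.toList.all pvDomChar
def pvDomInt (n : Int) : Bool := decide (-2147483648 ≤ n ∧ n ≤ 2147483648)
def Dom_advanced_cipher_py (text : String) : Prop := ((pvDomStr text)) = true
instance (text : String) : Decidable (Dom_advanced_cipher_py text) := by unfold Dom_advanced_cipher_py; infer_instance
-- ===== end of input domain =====

-- B builds the carrier by reversing the WHOLE text and reading the words back in reverse
-- order (no per-word reversal), then patches a precomputed list of alphabetic positions by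
-- rank parity instead of threading A's mutable sign toggle (objective: alternative).

-- ===== PORT A =====
-- inner loop body of A: one char, state = (encrypted_word, shift_direction)
def pvStepA (st : List Char × Int) (ch : Char) : List Char × Int :=
  if PySem.Chars.isalpha ch then
    let base : Int := if PySem.Chars.isupper ch then 65 else 97
    let shift : Int := 5 * st.2
    (st.1 ++ [Char.ofNat (PySem.Int.mod ((ch.toNat : Int) - base + shift) 26 + base).toNat],
     st.2 * (-1))
  else
    (st.1 ++ [ch], st.2)

-- outer loop body of A: one word, state = (result, shift_direction)
def pvOuterA (st : List (List Char) × Int) (w : List Char) : List (List Char) × Int :=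
  let r := w.foldl pvStepA ([], st.2)
  (st.1 ++ [r.1], r.2)

def advanced_cipher_py (text : String) : String :=
  let words := PySem.Chars.split₀ text.toList
  let reversed_words := words.map List.reverse  -- w[::-1] (slice with step -1 = List.reverse)
  let r := reversed_words.foldl pvOuterA ([], 1)
  String.ofList (PySem.Chars.join [' '] r.1)

-- ===== PORT B =====
-- loop body of B: one (rank, position) pair patched into the char list
def pvPatchB (cs : List Char) (ki : Int × Int) : List Char :=
  let ch := PySem.List.pyGetD cs ki.2 ' '   -- chars[i]; i comes from enumerate(chars), always in range
  let base : Int := if PySem.Chars.isupper ch then 65 else 97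
  let shift : Int := if PySem.Int.mod ki.1 2 == 0 then 5 else -5   -- (5, -5)[k % 2]
  PySem.List.pySetD cs ki.2 (Char.ofNat (PySem.Int.mod ((ch.toNat : Int) - base + shift) 26 + base).toNat)

def advanced_cipher_py_alt (text : String) : String :=
  -- ' '.join(reversed(text[::-1].split())): text[::-1] is slice step -1 = List.reverse
  let carrier := PySem.Chars.join [' '] ((PySem.Chars.split₀ text.toList.reverse).reverse)
  let alpha_positions :=
    ((PySem.List.enumerate carrier 0).filter (fun p => PySem.Chars.isalpha p.2)).map Prod.fst
  let chars := (PySem.List.enumerate alpha_positions 0).foldl pvPatchB carrier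
  String.ofList chars

-- ===== PRECONDITION & SPEC =====
def Spec_advanced_cipher_py (text : String) (out : String) : Prop := out = advanced_cipher_py_alt text
instance (text : String) (out : String) : Decidable (Spec_advanced_cipher_py text out) := by unfold Spec_advanced_cipher_py; infer_instance

-- ===== CLAIM (what is proved, stated in full; the proofs are below) =====
def Claim_equal_advanced_cipher_py : Prop := ∀ (text : String), Dom_advanced_cipher_py text → Spec_advanced_cipher_py text (advanced_cipher_py text)

-- ===== LEMMAS AND PROOFS =====

-- proof-side middle form: one flat pass with an alpha counter; both ports reduce to it
def pvMid (st : List Char × Nat) (ch : Char) : List Char × Nat :=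
  if PySem.Chars.isalpha ch then
    let base : Int := if PySem.Chars.isupper ch then 65 else 97
    let shift : Int := if st.2 % 2 == 0 then 5 else -5
    (st.1 ++ [Char.ofNat (PySem.Int.mod ((ch.toNat : Int) - base + shift) 26 + base).toNat],
     st.2 + 1)
  else
    (st.1 ++ [ch], st.2)

-- recursive form of the same pass
def pvSpec : Nat → List Char → List Char
  | _, [] => []
  | c, ch :: cs =>
    if PySem.Chars.isalpha ch then
      (Char.ofNat (PySem.Int.mod ((ch.toNat : Int) - (if PySem.Chars.isupper ch then 65 else 97)
          + (if c % 2 == 0 then 5 else -5)) 26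
          + (if PySem.Chars.isupper ch then 65 else 97)).toNat) :: pvSpec (c + 1) cs
    else ch :: pvSpec c cs

-- the sign A's toggle holds after c alphabetic characters
def pvDirOf (c : Nat) : Int := if c % 2 = 0 then 1 else -1

theorem pvFoldB_acc (cs : List Char) : ∀ (acc : List Char) (c : Nat),
    cs.foldl pvMid (acc, c) =
      (acc ++ (cs.foldl pvMid ([], c)).1, (cs.foldl pvMid ([], c)).2) := by
  induction cs with
  | nil => intro acc c; simp
  | cons a cs ih =>
    intro acc c
    simp only [List.foldl_cons, pvMid]
    by_cases h : PySem.Chars.isalpha a = true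
    · simp only [h, if_true]
      rw [ih, ih ([] ++ _)]
      simp
    · simp only [h, if_false, Bool.false_eq_true]
      rw [ih, ih ([] ++ _)]
      simp

theorem pvOuterA_acc (ws : List (List Char)) : ∀ (acc : List (List Char)) (d : Int),
    ws.foldl pvOuterA (acc, d) =
      (acc ++ (ws.foldl pvOuterA ([], d)).1, (ws.foldl pvOuterA ([], d)).2) := by
  induction ws with
  | nil => intro acc d; simp
  | cons w ws ih =>
    intro acc d
    simp only [List.foldl_cons, pvOuterA]
    rw [ih, ih ([] ++ _)]
    simp

theorem pvShift_eq (c : Nat) : 5 * pvDirOf c = (if c % 2 == 0 then (5 : Int) else -5) := by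
  unfold pvDirOf
  rcases Nat.mod_two_eq_zero_or_one c with h | h <;> simp [h]

theorem pvDir_flip (c : Nat) : pvDirOf c * (-1) = pvDirOf (c + 1) := by
  unfold pvDirOf
  rcases Nat.mod_two_eq_zero_or_one c with h | h <;> simp [h, Nat.add_mod]

-- A's inner char loop equals the middle pass under the parity/sign correspondence
theorem pvStepAB (w : List Char) : ∀ (acc : List Char) (c : Nat),
    w.foldl pvStepA (acc, pvDirOf c) =
      ((w.foldl pvMid (acc, c)).1, pvDirOf (w.foldl pvMid (acc, c)).2) := by
  induction w with
  | nil => intro acc c; simp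
  | cons a w ih =>
    intro acc c
    simp only [List.foldl_cons, pvStepA, pvMid]
    by_cases h : PySem.Chars.isalpha a = true
    · simp only [h, if_true, pvShift_eq c, pvDir_flip c]
      exact ih _ (c + 1)
    · simp only [h, if_false, Bool.false_eq_true]
      exact ih _ c

theorem pvMid_space (p : List Char × Nat) :
    pvMid p ' ' = (p.1 ++ [' '], p.2) := by
  simp [pvMid, show PySem.Chars.isalpha ' ' = false from by decide]

-- expose the head of A's outer fold result
theorem pvOuterA_cons (w : List Char) (ws : List (List Char)) (d : Int) :
    ((w :: ws).foldl pvOuterA ([], d)).1 =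
      (w.foldl pvStepA ([], d)).1 ::
        (ws.foldl pvOuterA ([], (w.foldl pvStepA ([], d)).2)).1 := by
  simp only [List.foldl_cons, pvOuterA]
  rw [pvOuterA_acc]
  simp

-- peel the first word off A's joined output
theorem pvJoin_outer_cons (w w' : List Char) (ws' : List (List Char)) (d : Int) :
    PySem.Chars.join [' '] (((w :: w' :: ws').foldl pvOuterA ([], d)).1) =
      (w.foldl pvStepA ([], d)).1 ++ [' '] ++
        PySem.Chars.join [' ']
          (((w' :: ws').foldl pvOuterA ([], (w.foldl pvStepA ([], d)).2)).1) := by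
  rw [pvOuterA_cons w (w' :: ws') d, pvOuterA_cons w' ws']
  rw [PySem.Chars.join_cons_cons, ← pvOuterA_cons w' ws']

-- A's join-of-per-word outputs = the single middle pass over the joined carrier
theorem pvMain (ws : List (List Char)) : ∀ (c : Nat),
    PySem.Chars.join [' '] ((ws.foldl pvOuterA ([], pvDirOf c)).1) =
      ((PySem.Chars.join [' '] ws).foldl pvMid ([], c)).1 := by
  induction ws with
  | nil => intro c; simp [PySem.Chars.join_nil]
  | cons w ws ih =>
    intro c
    cases ws with
    | nil =>
      rw [PySem.Chars.join_singleton]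
      simp only [List.foldl_cons, List.foldl_nil, pvOuterA]
      rw [pvStepAB w [] c]
      simp [PySem.Chars.join_singleton]
    | cons w' ws' =>
      rw [pvJoin_outer_cons, pvStepAB w [] c]
      rw [ih]
      rw [PySem.Chars.join_cons_cons, List.foldl_append, List.foldl_append]
      simp only [List.foldl_cons, List.foldl_nil]
      rw [pvMid_space]
      rw [pvFoldB_acc (PySem.Chars.join [' '] (w' :: ws'))
            ((List.foldl pvMid ([], c) w).1 ++ [' '])]

-- the middle pass computes pvSpec
theorem pvMidSpec (cs : List Char) : ∀ (c : Nat),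
    (cs.foldl pvMid ([], c)).1 = pvSpec c cs := by
  induction cs with
  | nil => intro c; simp [pvSpec]
  | cons a cs ih =>
    intro c
    simp only [List.foldl_cons, pvMid, pvSpec]
    by_cases h : PySem.Chars.isalpha a = true
    · simp only [h, if_true]
      rw [pvFoldB_acc]
      simp [ih]
    · simp only [h, if_false, Bool.false_eq_true]
      rw [pvFoldB_acc]
      simp [ih]

-- ===== carrier: split₀ of the reversed text = reversed list of reversed words =====

-- the words of s: the nonempty pieces of splitOnP isspace
def pvWords (s : List Char) : List (List Char) :=
  (s.splitOnP PySem.Chars.isspace).filter (fun w => !w.isEmpty)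

-- modify the last element of a list
def pvModLast (f : List Char → List Char) : List (List Char) → List (List Char)
  | [] => []
  | [a] => [f a]
  | a :: b :: t => a :: pvModLast f (b :: t)

theorem pvModLast_snoc (f : List Char → List Char) (xs : List (List Char)) (a : List Char) :
    pvModLast f (xs ++ [a]) = xs ++ [f a] := by
  induction xs with
  | nil => rfl
  | cons x xs ih =>
    cases xs with
    | nil => rfl
    | cons y ys =>
      simp only [List.cons_append, pvModLast]
      simp only [List.cons_append] at ih
      rw [ih]

theorem pvModLast_reverse (f : List Char → List Char) (ll : List (List Char)) :
    pvModLast f ll.reverse = (ll.modifyHead f).reverse := by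
  cases ll with
  | nil => rfl
  | cons a t =>
    simp only [List.reverse_cons, List.modifyHead_cons]
    rw [pvModLast_snoc]

theorem pvSplitOnP_snoc (p : Char → Bool) (xs : List Char) (c : Char) :
    (xs ++ [c]).splitOnP p =
      if p c then xs.splitOnP p ++ [[]] else pvModLast (· ++ [c]) (xs.splitOnP p) := by
  induction xs with
  | nil =>
    by_cases h : p c = true <;>
      simp [List.splitOnP_cons, List.splitOnP_nil, h, pvModLast]
  | cons x xs ih =>
    simp only [List.cons_append, List.splitOnP_cons, ih]
    by_cases hc : p c = true
    · simp only [hc, if_true]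
      by_cases hx : p x = true
      · simp [hx]
      · simp only [hx, if_false, Bool.false_eq_true]
        obtain ⟨w, ws, hws⟩ := List.exists_cons_of_ne_nil (List.splitOnP_ne_nil p xs)
        simp [hws]
    · simp only [hc, if_false, Bool.false_eq_true]
      by_cases hx : p x = true
      · simp only [hx, if_true]
        obtain ⟨w, ws, hws⟩ := List.exists_cons_of_ne_nil (List.splitOnP_ne_nil p xs)
        simp [hws, pvModLast]
      · simp only [hx, if_false, Bool.false_eq_true]
        obtain ⟨w, ws, hws⟩ := List.exists_cons_of_ne_nil (List.splitOnP_ne_nil p xs)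
        cases ws with
        | nil => simp [hws, pvModLast]
        | cons y ys => simp [hws, pvModLast]

theorem pvSplitOnP_reverse (p : Char → Bool) (l : List Char) :
    l.reverse.splitOnP p = ((l.splitOnP p).map List.reverse).reverse := by
  induction l with
  | nil => simp [List.splitOnP_nil]
  | cons c t ih =>
    rw [List.reverse_cons, pvSplitOnP_snoc, List.splitOnP_cons]
    by_cases hc : p c = true
    · simp [hc, ih]
    · simp only [hc, if_false, Bool.false_eq_true]
      rw [ih, pvModLast_reverse]
      congr 1
      obtain ⟨w, ws, hws⟩ := List.exists_cons_of_ne_nil (List.splitOnP_ne_nil p t)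
      simp [hws]

theorem pvWords_reverse (l : List Char) :
    pvWords l.reverse = ((pvWords l).map List.reverse).reverse := by
  unfold pvWords
  rw [pvSplitOnP_reverse, List.filter_reverse, List.filter_map]
  have hpred : ∀ w ∈ (l.splitOnP PySem.Chars.isspace),
      ((fun w => !w.isEmpty) ∘ List.reverse) w = (!w.isEmpty) := by
    intro w _
    cases w <;> simp
  rw [List.filter_congr hpred]

-- split₀ computes pvWords
theorem pvGo_spec (s : List Char) : ∀ (cur : List Char) (acc : List (List Char)),
    (∀ x ∈ cur, PySem.Chars.isspace x = false) →
    PySem.Chars.split₀.go s cur acc = acc.reverse ++ pvWords (cur.reverse ++ s) := by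
  induction s with
  | nil =>
    intro cur acc h
    rw [PySem.Chars.split₀.go]
    cases cur with
    | nil => simp [pvWords, List.splitOnP_nil]
    | cons x t =>
      have hsingle : (x :: t).reverse.splitOnP PySem.Chars.isspace = [(x :: t).reverse] := by
        apply List.splitOnP_eq_single
        intro y hy
        simp only [List.mem_reverse] at hy
        simp [h y hy]
      simp only [List.isEmpty_cons, Bool.false_eq_true, if_false]
      unfold pvWords
      rw [List.append_nil, hsingle]
      simp
  | cons c rest ih =>
    intro cur acc h
    rw [PySem.Chars.split₀.go]
    by_cases hc : PySem.Chars.isspace c = true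
    · simp only [hc, if_true]
      cases cur with
      | nil =>
        simp only [List.isEmpty_nil, if_true]
        rw [ih [] acc (by intro x hx; cases hx)]
        congr 1
        unfold pvWords
        rw [List.reverse_nil, List.nil_append, List.nil_append, List.splitOnP_cons, if_pos hc]
        simp
      | cons x t =>
        have hsingle : (x :: t).reverse.splitOnP PySem.Chars.isspace = [(x :: t).reverse] := by
          apply List.splitOnP_eq_single
          intro y hy
          simp only [List.mem_reverse] at hy
          simp [h y hy]
        simp only [List.isEmpty_cons, Bool.false_eq_true, if_false]
        rw [ih [] ((x :: t).reverse :: acc) (by intro y hy; cases hy)]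
        rw [List.reverse_cons, List.reverse_nil, List.nil_append, List.append_assoc]
        congr 1
        unfold pvWords
        rw [List.splitOnP_append_cons _ _ _ _ hc, hsingle, List.filter_append]
        simp
    · simp only [hc]
      rw [ih (c :: cur) acc]
      · simp
      · intro y hy
        rcases List.mem_cons.mp hy with rfl | hy
        · simpa using hc
        · exact h y hy

theorem pvSplit₀_eq (s : List Char) : PySem.Chars.split₀ s = pvWords s := by
  rw [PySem.Chars.split₀]
  rw [pvGo_spec s [] [] (by intro x hx; cases hx)]
  simp

-- B's carrier equals A's carrier
theorem pvCarrier_eq (l : List Char) :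
    (PySem.Chars.split₀ l.reverse).reverse = (PySem.Chars.split₀ l).map List.reverse := by
  rw [pvSplit₀_eq, pvSplit₀_eq, pvWords_reverse, List.reverse_reverse]

-- ===== patch pass: B's positional patches compute pvSpec =====

theorem pvSet_mid (v ch : Char) (cs : List Char) : ∀ (pre : List Char),
    (pre ++ ch :: cs).set pre.length v = pre ++ v :: cs := by
  intro pre
  induction pre with
  | nil => rfl
  | cons a pre ih => simp [ih]

theorem pvModCast (c : Nat) : (PySem.Int.mod (c : Int) 2 == (0 : Int)) = (c % 2 == 0) := by
  have h : PySem.Int.mod (c : Int) 2 = ((c % 2 : Nat) : Int) := by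
    rw [PySem.Int.mod_eq_emod_of_pos (by norm_num)]
    omega
  rw [h]
  rcases Nat.mod_two_eq_zero_or_one c with h2 | h2 <;> simp [h2]

theorem pvPatch_spec (cs : List Char) : ∀ (pre : List Char) (c : Nat),
    (PySem.List.enumerate
        (((PySem.List.enumerate cs (pre.length : Int)).filter
            (fun p => PySem.Chars.isalpha p.2)).map Prod.fst) (c : Int)).foldl
      pvPatchB (pre ++ cs) = pre ++ pvSpec c cs := by
  induction cs with
  | nil => intro pre c; simp [pvSpec, PySem.List.enumerate]
  | cons ch cs ih =>
    intro pre c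
    rw [PySem.List.enumerate_cons]
    by_cases h : PySem.Chars.isalpha ch = true
    · simp only [List.filter_cons, h, if_true, List.map_cons, PySem.List.enumerate_cons,
        List.foldl_cons]
      have hget : PySem.List.pyGetD (pre ++ ch :: cs) (pre.length : Int) ' ' = ch := by
        rw [PySem.List.pyGetD_natCast]
        simp [List.getD_eq_getElem?_getD]
      have hstep : pvPatchB (pre ++ ch :: cs) ((c : Int), (pre.length : Int)) =
          pre ++ (Char.ofNat (PySem.Int.mod ((ch.toNat : Int)
              - (if PySem.Chars.isupper ch then 65 else 97)
              + (if c % 2 == 0 then 5 else -5)) 26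
              + (if PySem.Chars.isupper ch then 65 else 97)).toNat) :: cs := by
        unfold pvPatchB
        simp only [hget, PySem.List.pySetD_natCast, pvModCast]
        rw [pvSet_mid]
      rw [hstep]
      have := ih (pre ++ [Char.ofNat (PySem.Int.mod ((ch.toNat : Int)
              - (if PySem.Chars.isupper ch then 65 else 97)
              + (if c % 2 == 0 then 5 else -5)) 26
              + (if PySem.Chars.isupper ch then 65 else 97)).toNat]) (c + 1)
      simp only [List.length_append, List.length_cons, List.length_nil, Nat.zero_add,
        List.append_assoc, List.cons_append, List.nil_append] at this
      rw [show ((c : Nat) : Int) + 1 = (((c + 1 : Nat)) : Int) by push_cast; ring,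
          show ((pre.length : Int) + 1) = (((pre.length + 1 : Nat)) : Int) by push_cast; ring]
      rw [this]
      simp [pvSpec, h]
    · simp only [List.filter_cons, h, if_false, Bool.false_eq_true]
      have := ih (pre ++ [ch]) c
      simp only [List.length_append, List.length_cons, List.length_nil, Nat.zero_add,
        List.append_assoc, List.cons_append, List.nil_append] at this
      rw [show ((pre.length : Int) + 1) = (((pre.length + 1 : Nat)) : Int) by push_cast; ring]
      rw [this]
      simp [pvSpec, h]

-- ===== VERDICT (by name: the statement is the Claim_ definition above) =====
theorem advanced_cipher_py_spec : Claim_equal_advanced_cipher_py := by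
  intro text _
  unfold Spec_advanced_cipher_py advanced_cipher_py advanced_cipher_py_alt
  dsimp only
  rw [pvCarrier_eq]
  have hA := pvMain ((PySem.Chars.split₀ text.toList).map List.reverse) 0
  rw [show pvDirOf 0 = (1 : Int) from rfl] at hA
  rw [hA, pvMidSpec]
  have hB := pvPatch_spec
      (PySem.Chars.join [' '] ((PySem.Chars.split₀ text.toList).map List.reverse)) [] 0
  simp only [List.length_nil, Nat.cast_zero, List.nil_append] at hB
  rw [hB]
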